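-- pv_equiv track=rewrite | github.com/garrettladley/BLSDashboard | main.py | list_years
-- ===== SOURCE A (Python) =====
-- import math
--
-- def list_years(min_year, max_year):
--     # if the years are equal, just return a list of length 1
--     # design decision to return min_year
--     if min_year == max_year:
--         return [min_year]
--     if min_year > max_year:
--         raise ValueError('min_year must be less than or equal to max_year')
--     result = []
--     num_periods = math.ceil((max_year - min_year) / 19)
--     for x in range(0, num_periods + 1):
--         if max_year - 19 * x < min_year:
--             result.append(min_year)
--         else:
--             result.append(max_year - 19 * x)
--
--     result.reverse()
--     return result
-- ===== SOURCE B (Python) =====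
-- def list_years(min_year, max_year):
--     if min_year == max_year:
--         return [min_year]
--     if min_year > max_year:
--         raise ValueError('min_year must be less than or equal to max_year')
--     # closed form: smallest term above min_year congruent to max_year mod 19
--     start = max_year - 19 * ((max_year - min_year - 1) // 19)
--     return [min_year] + list(range(start, max_year + 1, 19))
-- ===== Notes on version B (the rewrite author's own statement) =====
-- stated objective: simpler
-- what changed: Replaces the count-then-loop-with-clamp-then-reverse construction by a closed form: compute the smallest term above min_year congruent to max_year mod 19 and return [min_year] plus an ascending range(start, max_year+1, 19); no explicit loop, no per-element clamp, no reverse.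
import Mathlib
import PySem

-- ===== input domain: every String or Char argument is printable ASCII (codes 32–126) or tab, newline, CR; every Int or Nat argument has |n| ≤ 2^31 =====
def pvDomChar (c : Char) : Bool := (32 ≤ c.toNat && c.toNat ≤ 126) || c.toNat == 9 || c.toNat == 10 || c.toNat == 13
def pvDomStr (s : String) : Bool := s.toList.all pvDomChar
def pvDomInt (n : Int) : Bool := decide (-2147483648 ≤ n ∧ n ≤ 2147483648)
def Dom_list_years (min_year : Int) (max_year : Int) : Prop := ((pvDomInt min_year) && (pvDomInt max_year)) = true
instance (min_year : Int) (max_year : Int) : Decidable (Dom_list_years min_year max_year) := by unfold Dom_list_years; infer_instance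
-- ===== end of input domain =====

-- B replaces A's count-loop-clamp-reverse by a closed-form start and one ascending range (simpler; same cost).

-- ===== PORT A =====
-- math.ceil((max-min)/19) on these int magnitudes is exact ceiling division, ported as -((-(d)) // 19).
def list_years (min_year : Int) (max_year : Int) : List Int :=
  if min_year = max_year then [min_year]
  else if min_year > max_year then []  -- Python raises ValueError here; excluded by Pre_
  else
    let num_periods : Int := -(PySem.Int.floordiv (-(max_year - min_year)) 19)
    ((PySem.List.pyRange 0 (num_periods + 1) 1).foldl
      (fun acc x =>
        if max_year - 19 * x < min_year then acc ++ [min_year]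
        else acc ++ [max_year - 19 * x]) []).reverse

-- ===== PORT B =====
def list_years_alt (min_year : Int) (max_year : Int) : List Int :=
  if min_year = max_year then [min_year]
  else if min_year > max_year then []  -- Python raises ValueError here; excluded by Pre_
  else
    let start := max_year - 19 * PySem.Int.floordiv (max_year - min_year - 1) 19
    [min_year] ++ PySem.List.pyRange start (max_year + 1) 19

-- ===== PRECONDITION & SPEC =====
-- Pre_ excludes exactly min_year > max_year, where both Pythons raise ValueError.
def Pre_list_years (min_year : Int) (max_year : Int) : Prop := min_year ≤ max_year
instance (min_year : Int) (max_year : Int) : Decidable (Pre_list_years min_year max_year) := by unfold Pre_list_years; infer_instance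
def pvWitness_list_years : Int × Int := (2000, 2024)

def Spec_list_years (min_year : Int) (max_year : Int) (out : List Int) : Prop := out = list_years_alt min_year max_year
instance (min_year : Int) (max_year : Int) (out : List Int) : Decidable (Spec_list_years min_year max_year out) := by unfold Spec_list_years; infer_instance

-- ===== CLAIM (what is proved, stated in full; the proofs are below) =====
def Claim_equal_list_years : Prop := ∀ (min_year : Int) (max_year : Int), Dom_list_years min_year max_year → Pre_list_years min_year max_year → Spec_list_years min_year max_year (list_years min_year max_year)

-- ===== LEMMAS AND PROOFS =====

-- ===== VERDICT (by name: the statement is the Claim_ definition above) =====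
theorem list_years_spec : Claim_equal_list_years := by
  intro m M _ hpre
  unfold Spec_list_years list_years list_years_alt
  by_cases heq : m = M
  · rw [if_pos heq, if_pos heq]
  · have hlt : m < M := lt_of_le_of_ne hpre heq
    rw [if_neg heq, if_neg (not_lt.mpr hpre), if_neg heq, if_neg (not_lt.mpr hpre)]
    have hbody : (fun (acc : List Int) (x : Int) =>
        if M - 19 * x < m then acc ++ [m] else acc ++ [M - 19 * x])
        = fun acc x => acc ++ [if M - 19 * x < m then m else M - 19 * x] := by
      funext acc x; split <;> rfl
    dsimp only
    rw [hbody, PySem.List.foldl_append_singleton_eq_map, List.nil_append]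
    set q : Int := PySem.Int.floordiv (M - m - 1) 19 with hq
    set k : Int := -(PySem.Int.floordiv (-(M - m)) 19) with hk
    have hqdiv : q = (M - m - 1) / 19 := by
      rw [hq, PySem.Int.floordiv_eq_ediv_of_pos (by norm_num)]
    have hkdiv : k = -((-(M - m)) / 19) := by
      rw [hk, PySem.Int.floordiv_eq_ediv_of_pos (by norm_num)]
    have hkq : k = q + 1 := by rw [hqdiv, hkdiv]; omega
    have hk1 : 1 ≤ k := by rw [hkq, hqdiv]; omega
    have hklo : 19 * (k - 1) < M - m := by rw [hkq, hqdiv]; omega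
    have hkhi : M - m ≤ 19 * k := by rw [hkdiv]; omega
    set kn : Nat := k.toNat with hkn
    have hknk : (kn : Int) = k := by omega
    have hsz : (k + 1 - 0).toNat = kn + 1 := by omega
    rw [PySem.List.pyRange_one, hsz, List.map_map, List.range_succ, List.map_append]
    have hfirst : List.map ((fun x => if M - 19 * x < m then m else M - 19 * x) ∘ fun j : Nat => (0 : Int) + (j : Int)) (List.range kn) = List.map (fun (j : Nat) => M - 19 * (j : Int)) (List.range kn) := by
      apply List.map_congr_left
      intro j hj
      have hjlt : (j : Int) < (kn : Int) := by exact_mod_cast List.mem_range.mp hj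
      simp only [Function.comp]
      rw [if_neg (by omega)]
      ring_nf
    have hlast : List.map ((fun x => if M - 19 * x < m then m else M - 19 * x) ∘ fun j : Nat => (0 : Int) + (j : Int)) [kn] = [m] := by
      simp only [List.map_cons, List.map_nil, Function.comp]
      congr 1
      by_cases hc : M - 19 * ((0 : Int) + (kn : Int)) < m
      · rw [if_pos hc]
      · rw [if_neg hc]; omega
    rw [hfirst, hlast, List.reverse_append, List.reverse_singleton]
    -- B side: the ascending range has exactly kn elements
    have hstartlt : M - 19 * q < M + 1 := by rw [hqdiv]; omega
    have hn : (if M - 19 * q < M + 1 then ((M + 1 - (M - 19 * q) + 19 - 1) / 19).toNat else 0) = kn := by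
      rw [if_pos hstartlt, hqdiv]
      omega
    rw [PySem.List.pyRange_of_pos _ _ (by norm_num : (0:Int) < 19), hn]
    rw [List.singleton_append]
    congr 1
    apply List.ext_getElem
    · simp
    · intro i h1 h2
      simp only [List.append_eq, List.nil_append] at *
      simp only [List.length_reverse, List.length_map, List.length_range] at h1
      simp only [List.append_eq, List.nil_append, List.getElem_reverse, List.getElem_map, List.getElem_range, List.length_map, List.length_range] at h2 ⊢
      have hcast : ((kn - 1 - i : Nat) : Int) = (kn : Int) - 1 - (i : Int) := by omega
      rw [hcast]
      omega
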